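-- pv_equiv track=rewrite | github.com/florentz14/python-excercises | 07_Lists_and_Tuples/extra_210_sum_nonzero_groups.py | sum_nonzero_groups
-- ===== SOURCE A (Python) =====
-- def sum_nonzero_groups(lst: list[int]) -> list[int]:
--     result = []
--     current = 0
--     for x in lst:
--         if x != 0:
--             current += x
--         else:
--             if current != 0:
--                 result.append(current)
--                 current = 0
--     if current != 0:
--         result.append(current)
--     return result
-- ===== SOURCE B (Python) =====
-- def sum_nonzero_groups(lst: list[int]) -> list[int]:
--     # Prefix-sum + boundary-index algorithm: each maximal nonzero run is a
--     # difference of two prefix sums taken at the zero positions around it.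
--     prefix = [0]
--     for x in lst:
--         prefix.append(prefix[-1] + x)
--     zeros = [i for i, x in enumerate(lst) if x == 0]
--     starts = [0] + [i + 1 for i in zeros]
--     ends = zeros + [len(lst)]
--     return [s for l, r in zip(starts, ends) if (s := prefix[r] - prefix[l]) != 0]
-- ===== Notes on version B (the rewrite author's own statement) =====
-- stated objective: alternative
-- what changed: Replaces A's single-pass running-accumulator state machine with a prefix-sum + boundary-index algorithm: build the prefix-sum array, collect the positions of zeros, and emit each maximal run's sum as the difference of the two prefix sums at the run's boundaries, keeping the nonzero ones.
import Mathlib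
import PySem

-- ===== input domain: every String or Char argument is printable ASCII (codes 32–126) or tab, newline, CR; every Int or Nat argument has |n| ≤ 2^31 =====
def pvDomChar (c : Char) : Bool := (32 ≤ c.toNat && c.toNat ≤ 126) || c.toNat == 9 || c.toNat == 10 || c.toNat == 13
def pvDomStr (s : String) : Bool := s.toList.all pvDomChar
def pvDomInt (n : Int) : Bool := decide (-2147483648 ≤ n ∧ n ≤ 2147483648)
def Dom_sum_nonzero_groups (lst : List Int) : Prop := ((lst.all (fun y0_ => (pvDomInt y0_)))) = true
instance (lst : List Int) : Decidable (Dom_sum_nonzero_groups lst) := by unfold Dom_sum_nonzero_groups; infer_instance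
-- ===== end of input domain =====

-- B replaces A's running-accumulator state machine by a prefix-sum + zero-boundary
-- algorithm: each maximal nonzero run's sum is a difference of two prefix sums taken
-- at the zero positions around it (alternative decomposition; same cost).

-- ===== PORT A =====
def pvStepA (st : List Int × Int) (x : Int) : List Int × Int :=
  if x ≠ 0 then (st.1, st.2 + x)
  else if st.2 ≠ 0 then (st.1 ++ [st.2], 0) else st

def sum_nonzero_groups (lst : List Int) : List Int :=
  let st := lst.foldl pvStepA ([], 0)
  if st.2 ≠ 0 then st.1 ++ [st.2] else st.1

-- ===== PORT B =====
-- prefix.append(prefix[-1] + x)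
def pvPrefixStep (p : List Int) (x : Int) : List Int := p ++ [PySem.List.pyGetD p (-1) 0 + x]

-- [i for i, x in enumerate(lst) if x == 0]
def pvZeros (lst : List Int) : List Int :=
  ((PySem.List.enumerate lst).filter (fun q => q.2 == 0)).map (fun q => q.1)

-- Every index taken into `prefix` satisfies 0 ≤ i ≤ len(lst), so `getD _ 0` is
-- exact for Python's in-range `prefix[r]` / `prefix[l]`.
def sum_nonzero_groups_alt (lst : List Int) : List Int :=
  let pfx := lst.foldl pvPrefixStep [0]
  let zeros := pvZeros lst
  let starts := (0 : Int) :: zeros.map (· + 1)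
  let ends := zeros ++ [(lst.length : Int)]
  ((starts.zip ends).map
      (fun p => pfx.getD p.2.toNat 0 - pfx.getD p.1.toNat 0)).filter
    (fun s => s != 0)

-- ===== PRECONDITION & SPEC =====
def Spec_sum_nonzero_groups (lst : List Int) (out : List Int) : Prop := out = sum_nonzero_groups_alt lst
instance (lst : List Int) (out : List Int) : Decidable (Spec_sum_nonzero_groups lst out) := by unfold Spec_sum_nonzero_groups; infer_instance

-- ===== CLAIM (what is proved, stated in full; the proofs are below) =====
def Claim_equal_sum_nonzero_groups : Prop := ∀ (lst : List Int), Dom_sum_nonzero_groups lst → Spec_sum_nonzero_groups lst (sum_nonzero_groups lst)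

-- ===== LEMMAS AND PROOFS =====

-- A's loop with the pending partial sum made explicit.
def pvP (cur : Int) : List Int → List Int
  | [] => if cur ≠ 0 then [cur] else []
  | x :: xs =>
    if x ≠ 0 then pvP (cur + x) xs
    else (if cur ≠ 0 then [cur] else []) ++ pvP 0 xs

theorem pvP_foldl (lst : List Int) : ∀ (res : List Int) (cur : Int),
    (let st := lst.foldl pvStepA (res, cur);
     if st.2 ≠ 0 then st.1 ++ [st.2] else st.1) = res ++ pvP cur lst := by
  induction lst with
  | nil => intro res cur; by_cases h : cur = 0 <;> simp [pvP, h]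
  | cons x xs ih =>
    intro res cur
    by_cases hx : x = 0
    · by_cases hc : cur = 0
      · simp [pvStepA, pvP, hx, hc, ih]
      · simp [pvStepA, pvP, hx, hc, ih (res ++ [cur]) 0]
    · simp [pvStepA, pvP, hx, ih]

-- A's result = sums of splitOnP segments, first one bumped by cur, nonzeros kept.
theorem pvP_split : ∀ (xs : List Int) (cur : Int),
    pvP cur xs =
      ((((xs.splitOnP (fun y => y == 0)).map List.sum).modifyHead (cur + ·)).filter
        (fun s => s != 0)) := by
  intro xs
  induction xs with
  | nil =>
    intro cur
    by_cases h : cur = 0 <;> simp [pvP, List.splitOnP_nil, h]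
  | cons x xs ih =>
    intro cur
    obtain ⟨h, t, hS⟩ := List.exists_cons_of_ne_nil (List.splitOnP_ne_nil (fun y => (y == 0)) xs)
    by_cases hx : x = 0
    · subst hx
      simp only [pvP, ne_eq, not_true_eq_false, if_false, ite_not]
      rw [ih 0, List.splitOnP_cons]
      simp only [beq_self_eq_true, if_pos, List.map_cons, List.sum_nil, hS]
      by_cases hc : cur = 0 <;>
        simp [hc, List.filter, List.modifyHead]
    · simp only [pvP, ne_eq, hx, not_false_eq_true, if_pos]
      rw [ih (cur + x), List.splitOnP_cons]
      simp only [show ((x == (0:Int)) = false) by simpa using hx, Bool.false_eq_true, if_false, hS]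
      simp [List.modifyHead, add_assoc]

-- ---- B side ----

-- structural description of the zero positions
def pvG : List Int → List Int
  | [] => []
  | x :: xs => (if x = 0 then [(0 : Int)] else []) ++ (pvG xs).map (· + 1)

theorem pvZeros_shift : ∀ (xs : List Int) (s : Int),
    ((PySem.List.enumerate xs s).filter (fun q => q.2 == 0)).map (fun q => q.1)
      = (pvG xs).map (fun e => s + e) := by
  intro xs
  induction xs with
  | nil => intro s; simp [PySem.List.enumerate_nil, pvG]
  | cons x xs ih =>
    intro s
    have hmap : ∀ g : List Int,
        List.map (fun e => (s + 1) + e) g = List.map (fun e => s + e) (g.map (· + 1)) := by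
      intro g
      rw [List.map_map]
      apply List.map_congr_left
      intro a _
      simp only [Function.comp_apply]
      ring
    rw [PySem.List.enumerate_cons]
    by_cases hx : x = 0
    · simp [hx, pvG, ih (s + 1), hmap]
    · simp [hx, pvG, ih (s + 1), hmap]

theorem pvZeros_eq_G (xs : List Int) : pvZeros xs = pvG xs := by
  unfold pvZeros
  rw [pvZeros_shift xs 0]
  simp

theorem pvG_bounds : ∀ (xs : List Int), ∀ e ∈ pvG xs, 0 ≤ e ∧ e < (xs.length : Int) := by
  intro xs
  induction xs with
  | nil => simp [pvG]
  | cons x xs ih =>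
    intro e he
    simp only [pvG, List.mem_append, List.mem_map] at he
    rcases he with he | ⟨f, hf, rfl⟩
    · have he0 : e = 0 := by
        by_cases hx : x = 0
        · simpa [hx] using he
        · simp [hx] at he
      subst he0
      constructor
      · omega
      · simp only [List.length_cons]; push_cast; omega
    · have := ih f hf
      simp only [List.length_cons]
      push_cast
      omega

-- prefix list built by the loop = scanl
theorem pvPrefix_scanl : ∀ (xs : List Int) (acc : List Int) (c : Int),
    xs.foldl pvPrefixStep (acc ++ [c]) = acc ++ List.scanl (· + ·) c xs := by
  intro xs
  induction xs with
  | nil => intro acc c; simp [List.scanl]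
  | cons x xs ih =>
    intro acc c
    rw [List.foldl_cons]
    have h1 : pvPrefixStep (acc ++ [c]) x = (acc ++ [c]) ++ [c + x] := by
      simp [pvPrefixStep]
    rw [h1, ih (acc ++ [c]) (c + x)]
    simp [List.scanl_cons]

-- getD through the cons/map shift, for in-range indices
theorem pvGetD_shift (x : Int) (pre : List Int) (e : Int) (h0 : 0 ≤ e)
    (h1 : e < (pre.length : Int)) :
    (0 :: pre.map (fun t => x + t)).getD (e + 1).toNat 0 = x + pre.getD e.toNat 0 := by
  have he : (e + 1).toNat = e.toNat + 1 := by omega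
  have hlt : e.toNat < pre.length := by omega
  rw [he, List.getD_cons_succ, List.getD_eq_getElem?_getD, List.getD_eq_getElem?_getD,
    List.getElem?_map, List.getElem?_eq_getElem hlt]
  simp

theorem pvZipShift (x : Int) (pre : List Int) : ∀ (ls rs : List Int),
    (∀ e ∈ ls, 0 ≤ e ∧ e < (pre.length : Int)) → (∀ e ∈ rs, 0 ≤ e ∧ e < (pre.length : Int)) →
    ((ls.map (· + 1)).zip (rs.map (· + 1))).map
        (fun p => (0 :: pre.map (fun t => x + t)).getD p.2.toNat 0
                  - (0 :: pre.map (fun t => x + t)).getD p.1.toNat 0)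
      = (ls.zip rs).map (fun p => pre.getD p.2.toNat 0 - pre.getD p.1.toNat 0) := by
  intro ls
  induction ls with
  | nil => intro rs _ _; simp
  | cons a ls ih =>
    intro rs hls hrs
    cases rs with
    | nil => simp
    | cons b rs =>
      have ha := hls a (by simp)
      have hb := hrs b (by simp)
      simp only [List.map_cons, List.zip_cons_cons]
      rw [pvGetD_shift x pre b hb.1 hb.2, pvGetD_shift x pre a ha.1 ha.2,
        ih rs (fun e he => hls e (List.mem_cons_of_mem _ he))
          (fun e he => hrs e (List.mem_cons_of_mem _ he))]
      congr 1
      ring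

def pvU (xs : List Int) : List Int :=
  (((0 : Int) :: (pvG xs).map (· + 1)).zip (pvG xs ++ [(xs.length : Int)])).map
    (fun p => (List.scanl (· + ·) 0 xs).getD p.2.toNat 0
              - (List.scanl (· + ·) 0 xs).getD p.1.toNat 0)

theorem pvAlt_filter_U (lst : List Int) :
    sum_nonzero_groups_alt lst = (pvU lst).filter (fun s => s != 0) := by
  have hp := pvPrefix_scanl lst [] 0
  simp only [List.nil_append] at hp
  simp only [sum_nonzero_groups_alt, pvU, pvZeros_eq_G, hp]

theorem pvScanl_shift : ∀ (xs : List Int) (c : Int),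
    List.scanl (· + ·) c xs = (List.scanl (· + ·) 0 xs).map (fun t => c + t) := by
  intro xs
  induction xs with
  | nil => intro c; simp [List.scanl]
  | cons y ys ih =>
    intro c
    simp only [List.scanl_cons, List.map_cons, zero_add, add_zero]
    rw [ih (c + y), ih y, List.map_map]
    congr 1
    apply List.map_congr_left
    intro a _
    simp only [Function.comp_apply]
    ring

theorem pvScanl_head (xs : List Int) : (List.scanl (· + ·) (0 : Int) xs).getD 0 0 = 0 := by
  cases xs <;> simp [List.scanl_cons, List.scanl_nil]

theorem pvU_cons (x : Int) (xs : List Int) :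
    pvU (x :: xs) = if x = 0 then 0 :: pvU xs else (pvU xs).modifyHead (x + ·) := by
  have hpre : List.scanl (· + ·) 0 (x :: xs)
      = 0 :: (List.scanl (· + ·) 0 xs).map (fun t => x + t) := by
    rw [List.scanl_cons, zero_add, pvScanl_shift xs x]
  have hlen : ((List.scanl (· + ·) 0 xs).length : Int) = (xs.length : Int) + 1 := by
    simp [List.length_scanl]
  have hbe : ∀ e ∈ pvG xs ++ [(xs.length : Int)],
      0 ≤ e ∧ e < ((List.scanl (· + ·) 0 xs).length : Int) := by
    intro e he
    rcases List.mem_append.mp he with h | h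
    · have := pvG_bounds xs e h
      omega
    · simp only [List.mem_singleton] at h
      subst h
      omega
  have hbs : ∀ e ∈ (0 : Int) :: (pvG xs).map (· + 1),
      0 ≤ e ∧ e < ((List.scanl (· + ·) 0 xs).length : Int) := by
    intro e he
    rcases List.mem_cons.mp he with h | h
    · subst h; omega
    · rcases List.mem_map.mp h with ⟨f, hf, rfl⟩
      have := pvG_bounds xs f hf
      omega
  have hcast : (((x :: xs).length : Nat) : Int) = (xs.length : Int) + 1 := by
    push_cast [List.length_cons]
    ring
  by_cases hx : x = 0
  · subst hx
    rw [if_pos rfl]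
    show (((0 : Int) :: (pvG ((0:Int) :: xs)).map (· + 1)).zip
        (pvG ((0:Int) :: xs) ++ [(((0:Int) :: xs).length : Int)])).map
        (fun p => (List.scanl (· + ·) 0 ((0:Int) :: xs)).getD p.2.toNat 0
                  - (List.scanl (· + ·) 0 ((0:Int) :: xs)).getD p.1.toNat 0)
      = 0 :: pvU xs
    rw [hpre, hcast]
    have hG : pvG ((0:Int) :: xs) = (0 : Int) :: (pvG xs).map (· + 1) := by
      simp [pvG]
    rw [hG]
    have hends : ((pvG xs).map (· + 1) ++ [(xs.length : Int) + 1])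
        = (pvG xs ++ [(xs.length : Int)]).map (· + 1) := by
      simp
    have hstarts : (((0 : Int) + 1) :: ((pvG xs).map (· + 1)).map (· + 1))
        = ((0 : Int) :: (pvG xs).map (· + 1)).map (· + 1) := by
      simp
    simp only [List.map_cons, List.cons_append, List.zip_cons_cons, List.map_cons]
    rw [hends, hstarts, pvZipShift 0 (List.scanl (· + ·) 0 xs) _ _ hbs hbe]
    simp [pvU]
  · rw [if_neg hx]
    show (((0 : Int) :: (pvG (x :: xs)).map (· + 1)).zip
        (pvG (x :: xs) ++ [((x :: xs).length : Int)])).map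
        (fun p => (List.scanl (· + ·) 0 (x :: xs)).getD p.2.toNat 0
                  - (List.scanl (· + ·) 0 (x :: xs)).getD p.1.toNat 0)
      = (pvU xs).modifyHead (x + ·)
    rw [hpre, hcast]
    have hG : pvG (x :: xs) = (pvG xs).map (· + 1) := by
      simp [pvG, hx]
    rw [hG]
    obtain ⟨e0, erest, he⟩ :=
      List.exists_cons_of_ne_nil (show pvG xs ++ [(xs.length : Int)] ≠ [] by simp)
    have he0 : 0 ≤ e0 ∧ e0 < ((List.scanl (· + ·) 0 xs).length : Int) :=
      hbe e0 (by rw [he]; exact List.mem_cons_self ..)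
    have herest : ∀ e ∈ erest, 0 ≤ e ∧ e < ((List.scanl (· + ·) 0 xs).length : Int) := by
      intro e hmem
      exact hbe e (by rw [he]; exact List.mem_cons_of_mem _ hmem)
    have hsrest : ∀ e ∈ (pvG xs).map (· + 1),
        0 ≤ e ∧ e < ((List.scanl (· + ·) 0 xs).length : Int) := by
      intro e hmem
      exact hbs e (List.mem_cons_of_mem _ hmem)
    have hends : ((pvG xs).map (· + 1) ++ [(xs.length : Int) + 1])
        = (e0 + 1) :: erest.map (· + 1) := by
      have : (pvG xs ++ [(xs.length : Int)]).map (· + 1) = (e0 + 1) :: erest.map (· + 1) := by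
        rw [he, List.map_cons]
      rw [← this]
      simp
    rw [hends]
    simp only [List.map_cons, List.zip_cons_cons, List.map_cons]
    rw [pvZipShift x (List.scanl (· + ·) 0 xs) _ _ hsrest herest]
    have hU : pvU xs = ((List.scanl (· + ·) 0 xs).getD e0.toNat 0
          - (List.scanl (· + ·) 0 xs).getD (0 : Int).toNat 0)
        :: (((pvG xs).map (· + 1)).zip erest).map
          (fun p => (List.scanl (· + ·) 0 xs).getD p.2.toNat 0
                    - (List.scanl (· + ·) 0 xs).getD p.1.toNat 0) := by
      unfold pvU
      rw [he]
      simp only [List.zip_cons_cons, List.map_cons]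
    rw [hU]
    simp only [List.modifyHead]
    congr 1
    rw [pvGetD_shift x _ e0 he0.1 he0.2]
    have h0 : ((0 : Int) :: (List.scanl (· + ·) 0 xs).map (fun t => x + t)).getD
        (0 : Int).toNat 0 = 0 := by
      simp [Int.toNat_zero]
    rw [h0]
    have h0' : (List.scanl (· + ·) 0 xs).getD (0 : Int).toNat 0 = 0 := by
      rw [Int.toNat_zero]
      exact pvScanl_head xs
    rw [h0']
    ring

theorem pvU_split (xs : List Int) :
    pvU xs = (xs.splitOnP (fun y => y == 0)).map List.sum := by
  induction xs with
  | nil => decide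
  | cons x xs ih =>
    rw [pvU_cons, List.splitOnP_cons]
    by_cases hx : x = 0
    · subst hx
      simp [ih]
    · obtain ⟨h, t, hS⟩ :=
        List.exists_cons_of_ne_nil (List.splitOnP_ne_nil (fun y => (y == 0)) xs)
      rw [if_neg hx, show ((x == (0:Int)) = false) by simpa using hx]
      simp only [Bool.false_eq_true, if_false]
      rw [ih, hS]
      simp [List.modifyHead]

-- ===== VERDICT (by name: the statement is the Claim_ definition above) =====
theorem sum_nonzero_groups_spec : Claim_equal_sum_nonzero_groups := by
  intro lst _
  unfold Spec_sum_nonzero_groups sum_nonzero_groups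
  rw [pvP_foldl lst [] 0, pvAlt_filter_U, pvU_split, List.nil_append, pvP_split]
  obtain ⟨h, t, hS⟩ :=
    List.exists_cons_of_ne_nil (List.splitOnP_ne_nil (fun y => (y == 0)) lst)
  rw [hS]
  simp [List.modifyHead]
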